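-- pv_equiv track=rewrite | github.com/medvedit/Python_GB | Seminar/Seminar_3_parallel_group.py | neg_fob
-- ===== SOURCE A (Python) =====
-- def neg_fob(n: int) -> list:
--     a, b = 1, 1
--     list_num = [0]
--
--     for item in range(n):
--         list_num.append(a)
--         list_num.insert(0, a * (-1) ** item)
--         a, b = b, b + a
--     return list_num
-- ===== SOURCE B (Python) =====
-- def neg_fob(n: int) -> list:
--     # generation pass: plain Fibonacci values
--     a, b = 1, 1
--     fibs = []
--     for _ in range(n):
--         fibs.append(a)
--         a, b = b, b + a
--     # assembly: signed front wing, reversed, then 0, then the plain values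
--     front = [v * (-1) ** i for i, v in enumerate(fibs)]
--     front.reverse()
--     return front + [0] + fibs
-- ===== Notes on version B (the rewrite author's own statement) =====
-- stated objective: alternative
-- what changed: B separates generation from assembly: one pass builds the plain Fibonacci list, the signed front wing is produced by an enumerate comprehension and reversed, and the result is concatenated, instead of A's single loop interleaving append and insert(0, ...).
import Mathlib
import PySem

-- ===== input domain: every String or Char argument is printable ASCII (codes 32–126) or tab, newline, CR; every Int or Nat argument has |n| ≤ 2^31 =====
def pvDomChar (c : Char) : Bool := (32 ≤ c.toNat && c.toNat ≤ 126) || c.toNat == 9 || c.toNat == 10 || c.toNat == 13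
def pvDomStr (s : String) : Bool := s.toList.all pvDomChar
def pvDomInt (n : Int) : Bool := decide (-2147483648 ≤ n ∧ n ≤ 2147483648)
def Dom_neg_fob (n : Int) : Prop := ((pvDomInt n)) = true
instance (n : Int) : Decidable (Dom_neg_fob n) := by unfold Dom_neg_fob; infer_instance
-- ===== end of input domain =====

-- B separates Fibonacci generation from assembly (signed front wing via enumerate,
-- reversed, then concatenated) instead of A's single loop interleaving append and insert(0, ...).

-- ===== PORT A =====
-- one loop interleaving append and insert(0, …); (-1)**item ported as (-1)^item.toNat
-- (exact: item ranges over 0..n-1, all nonnegative)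
def neg_fob (n : Int) : List Int :=
  ((PySem.List.pyRange 0 n 1).foldl
    (fun (st : Int × Int × List Int) item =>
      (st.2.1, st.2.1 + st.1, (st.1 * (-1) ^ item.toNat) :: (st.2.2 ++ [st.1])))
    (1, 1, [0])).2.2

-- ===== PORT B =====
-- generation pass, then enumerate-comprehension wing, reversed, then concatenation
def neg_fob_alt (n : Int) : List Int :=
  let fibs := ((PySem.List.pyRange 0 n 1).foldl
    (fun (st : Int × Int × List Int) _ =>
      (st.2.1, st.2.1 + st.1, st.2.2 ++ [st.1]))
    (1, 1, [])).2.2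
  let front := (PySem.List.enumerate fibs).map (fun p => p.2 * (-1) ^ p.1.toNat)
  front.reverse ++ [0] ++ fibs

-- ===== PRECONDITION & SPEC =====
def Spec_neg_fob (n : Int) (out : List Int) : Prop := out = neg_fob_alt n
instance (n : Int) (out : List Int) : Decidable (Spec_neg_fob n out) := by unfold Spec_neg_fob; infer_instance

-- ===== CLAIM (what is proved, stated in full; the proofs are below) =====
def Claim_equal_neg_fob : Prop := ∀ (n : Int), Dom_neg_fob n → Spec_neg_fob n (neg_fob n)

-- ===== LEMMAS AND PROOFS =====

def pvFib : Nat → Int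
  | 0 => 1
  | 1 => 1
  | k + 2 => pvFib (k + 1) + pvFib k

def pvFl (k : Nat) : List Int := (List.range k).map pvFib

def pvSf (k : Nat) : List Int :=
  ((List.range k).map (fun i => pvFib i * (-1) ^ i)).reverse

theorem pvFl_succ (k : Nat) : pvFl (k + 1) = pvFl k ++ [pvFib k] := by
  simp [pvFl, List.range_succ]

theorem pvFl_length (k : Nat) : (pvFl k).length = k := by simp [pvFl]

theorem foldA (k : Nat) :
    (PySem.List.pyRange 0 (k : Int) 1).foldl
      (fun (st : Int × Int × List Int) item =>
        (st.2.1, st.2.1 + st.1, (st.1 * (-1) ^ item.toNat) :: (st.2.2 ++ [st.1])))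
      (1, 1, [0])
    = (pvFib k, pvFib (k + 1), pvSf k ++ 0 :: pvFl k) := by
  induction k with
  | zero => simp [pvFib, pvSf, pvFl]
  | succ k ih =>
    have h : ((k + 1 : Nat) : Int) = (k : Int) + 1 := by push_cast; ring
    rw [h, PySem.List.pyRange_one_succ_right (show (0:Int) ≤ (k:Int) from Int.natCast_nonneg k), List.foldl_append, ih]
    simp [pvFib, pvSf, pvFl, List.range_succ]

theorem foldB (k : Nat) :
    (PySem.List.pyRange 0 (k : Int) 1).foldl
      (fun (st : Int × Int × List Int) _ =>
        (st.2.1, st.2.1 + st.1, st.2.2 ++ [st.1]))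
      (1, 1, [])
    = (pvFib k, pvFib (k + 1), pvFl k) := by
  induction k with
  | zero => simp [pvFib, pvFl]
  | succ k ih =>
    have h : ((k + 1 : Nat) : Int) = (k : Int) + 1 := by push_cast; ring
    rw [h, PySem.List.pyRange_one_succ_right (show (0:Int) ≤ (k:Int) from Int.natCast_nonneg k), List.foldl_append, ih]
    simp [pvFib, pvFl, List.range_succ]

theorem enumMap (k : Nat) :
    (PySem.List.enumerate (pvFl k)).map (fun p => p.2 * (-1) ^ p.1.toNat)
    = (List.range k).map (fun i => pvFib i * (-1) ^ i) := by
  induction k with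
  | zero => simp [pvFl]
  | succ k ih =>
    rw [pvFl_succ, PySem.List.enumerate_append, List.map_append, ih]
    simp [PySem.List.enumerate, pvFl_length, List.range_succ]

theorem alt_eq (k : Nat) :
    neg_fob_alt (k : Int) = pvSf k ++ 0 :: pvFl k := by
  simp only [neg_fob_alt, foldB, enumMap, pvSf]
  simp

theorem eq_nat (k : Nat) : neg_fob (k : Int) = neg_fob_alt (k : Int) := by
  rw [alt_eq]
  unfold neg_fob
  rw [foldA]

theorem eq_all (n : Int) : neg_fob n = neg_fob_alt n := by
  by_cases h : n ≤ 0
  · unfold neg_fob neg_fob_alt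
    rw [PySem.List.pyRange_one_eq_nil h]
    simp
  · rw [not_le] at h
    have : n = (n.toNat : Int) := by omega
    rw [this]; exact eq_nat n.toNat

-- ===== VERDICT (by name: the statement is the Claim_ definition above) =====
theorem neg_fob_spec : Claim_equal_neg_fob := by
  intro n _
  unfold Spec_neg_fob
  exact eq_all n
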